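-- pv_equiv track=rewrite | github.com/BulavkinNN/homeWork | hw_3.py | upin_str
-- ===== SOURCE A (Python) =====
-- def upin_str(a, step):
--     """
--     Up char in str with in step
--     :return:str
--     """
--     if type(a) != str or type(step) != int or step < 1:
--         raise TypeError('Need only str')
--     counter = 0
--     new_str = ""
--     for item in a:
--         if counter % step == 0:
--             new_str += item.upper()
--         else:
--             new_str += item
--         counter += 1
--     return new_str
-- ===== SOURCE B (Python) =====
-- def upin_str(a, step):
--     """
--     Up char in str with in step
--     :return:str
--     """
--     if type(a) != str or type(step) != int or step < 1:
--         raise TypeError('Need only str')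
--     chars = list(a)
--     for i in range(0, len(chars), step):
--         chars[i] = chars[i].upper()
--     return ''.join(chars)
-- ===== Notes on version B (the rewrite author's own statement) =====
-- stated objective: simpler
-- what changed: Instead of scanning every character, testing counter % step and concatenating strings, B mutates a char list in place at exactly the multiples-of-step positions via a stride range and joins once; only n/step positions are touched with no per-character branch.
import Mathlib
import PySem

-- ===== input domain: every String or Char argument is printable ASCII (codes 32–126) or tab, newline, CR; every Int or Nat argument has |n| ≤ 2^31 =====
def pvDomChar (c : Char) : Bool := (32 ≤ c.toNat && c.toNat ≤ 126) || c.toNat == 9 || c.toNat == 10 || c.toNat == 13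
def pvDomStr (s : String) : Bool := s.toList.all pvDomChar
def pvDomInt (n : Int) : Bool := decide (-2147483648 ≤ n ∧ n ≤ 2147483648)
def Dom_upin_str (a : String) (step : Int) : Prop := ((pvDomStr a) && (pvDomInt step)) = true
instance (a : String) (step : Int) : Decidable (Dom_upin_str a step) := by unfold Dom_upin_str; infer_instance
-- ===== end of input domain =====

-- B replaces A's per-character scan with a counter % step test and string concatenation
-- by a stride loop that uppercases exactly the multiples-of-step positions in a char list (objective: simpler).


-- ===== PORT A =====
-- the 'for item in a' loop with its counter and accumulated new_str
def upinGoA (step : Int) : List Char → Int → List Char → List Char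
  | [], _, new_str => new_str
  | item :: rest, counter, new_str =>
      upinGoA step rest (counter + 1)
        (new_str ++ (if PySem.Int.mod counter step == 0
                     then PySem.Chars.upper [item] else [item]))

def upin_str (a : String) (step : Int) : String :=
  -- the 'step < 1 → raise TypeError' guard is excluded by Pre_upin_str
  String.ofList (upinGoA step a.toList 0 [])

-- ===== PORT B =====
-- chars = list(a); for i in range(0, len(chars), step): chars[i] = chars[i].upper(); ''.join(chars)
-- (i is always a valid nonnegative index, so chars[i] is read with getD and written with set)
def upin_str_alt (a : String) (step : Int) : String :=
  let chars := a.toList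
  String.ofList ((PySem.List.pyRange 0 chars.length step).foldl
    (fun cs i => cs.set i.toNat (PySem.Chars.upperChar (cs.getD i.toNat ' '))) chars)

-- ===== PRECONDITION & SPEC =====
-- A raises TypeError when step < 1; exactly those inputs are excluded.
def Pre_upin_str (_a : String) (step : Int) : Prop := 1 ≤ step
instance (a : String) (step : Int) : Decidable (Pre_upin_str a step) := by
  unfold Pre_upin_str; infer_instance

def pvWitness_upin_str : String × Int := ("hello world", 3)

def Spec_upin_str (a : String) (step : Int) (out : String) : Prop := out = upin_str_alt a step
instance (a : String) (step : Int) (out : String) : Decidable (Spec_upin_str a step out) := by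
  unfold Spec_upin_str; infer_instance

-- ===== CLAIM (what is proved, stated in full; the proofs are below) =====
def Claim_equal_upin_str : Prop := ∀ (a : String) (step : Int), Dom_upin_str a step → Pre_upin_str a step → Spec_upin_str a step (upin_str a step)

-- ===== LEMMAS AND PROOFS =====

-- A's loop without the accumulator
def upinFA (step : Int) : List Char → Int → List Char
  | [], _ => []
  | item :: rest, counter =>
      (if PySem.Int.mod counter step == 0
       then PySem.Chars.upper [item] else [item]) ++ upinFA step rest (counter + 1)

theorem upinGoA_eq (step : Int) (l : List Char) (c : Int) (acc : List Char) :
    upinGoA step l c acc = acc ++ upinFA step l c := by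
  induction l generalizing c acc with
  | nil => simp [upinGoA, upinFA]
  | cons x xs ih => simp [upinGoA, upinFA, ih]

theorem upinFA_getElem? (step : Int) (l : List Char) (c : Int) (k : Nat) :
    (upinFA step l c)[k]? =
      if PySem.Int.mod (c + k) step == 0
      then l[k]?.map PySem.Chars.upperChar else l[k]? := by
  induction l generalizing c k with
  | nil => simp [upinFA]
  | cons x xs ih =>
    cases k with
    | zero => simp [upinFA, PySem.Chars.upper]; split_ifs <;> simp
    | succ k =>
      have := ih (c + 1) k
      simp only [upinFA]
      have hlen : (if PySem.Int.mod c step == 0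
          then PySem.Chars.upper [x] else [x]).length = 1 := by
        split_ifs <;> simp [PySem.Chars.upper]
      rw [List.getElem?_append_right (by omega), hlen]
      simpa [add_assoc, add_comm, add_left_comm] using this

-- B's fold over a Nodup list of in-range nonneg indices, pointwise
theorem foldl_set_getElem? (idxs : List Int) (l : List Char)
    (hin : ∀ i ∈ idxs, 0 ≤ i ∧ i < (l.length : Int)) (hnd : idxs.Nodup) (k : Nat) :
    (idxs.foldl (fun cs i => cs.set i.toNat (PySem.Chars.upperChar (cs.getD i.toNat ' '))) l)[k]? =
      if (k : Int) ∈ idxs then l[k]?.map PySem.Chars.upperChar else l[k]? := by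
  induction idxs generalizing l with
  | nil => simp
  | cons i rest ih =>
    have hi := hin i (by simp)
    have hklt : i.toNat < l.length := by omega
    have hget : l.getD i.toNat ' ' = l[i.toNat] := List.getD_eq_getElem l ' ' hklt
    have hnd' : rest.Nodup := hnd.of_cons
    have hine : i ∉ rest := by
      have := List.nodup_cons.mp hnd; exact this.1
    simp only [List.foldl_cons]
    rw [ih (l.set i.toNat (PySem.Chars.upperChar (l.getD i.toNat ' ')))
        (by intro j hj; have := hin j (List.mem_cons_of_mem _ hj); simpa using this) hnd']
    by_cases hk : (k : Int) ∈ rest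
    · have hne : i.toNat ≠ k := by
        intro h; apply hine; rwa [← h, Int.toNat_of_nonneg hi.1] at hk
      simp [hk, hne]
    · by_cases hik : (k : Int) = i
      · have hik' : i.toNat = k := by omega
        have hklt' : k < l.length := hik' ▸ hklt
        rw [if_neg hk, List.getElem?_set, if_pos hik', if_pos (hik' ▸ hklt),
            if_pos (show (k : Int) ∈ i :: rest by simp [hik]),
            List.getElem?_eq_getElem hklt', hget]
        simp [hik']
      · have hne : i.toNat ≠ k := by omega
        simp [hk, hik, hne]

theorem nodup_pyRange_pos (a b s : Int) (h : 0 < s) : (PySem.List.pyRange a b s).Nodup := by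
  rw [PySem.List.pyRange_of_pos _ _ h]
  refine List.Nodup.map ?_ List.nodup_range
  intro x y hxy
  simp only at hxy
  have h1 : s * (x : Int) = s * (y : Int) := by omega
  have h2 : (x : Int) = y := mul_left_cancel₀ (by omega) h1
  exact_mod_cast h2

-- ===== VERDICT (by name: the statement is the Claim_ definition above) =====
theorem upin_str_spec : Claim_equal_upin_str := by
  intro a step _ hpre
  unfold Spec_upin_str upin_str upin_str_alt
  have hs : (0 : Int) < step := hpre
  congr 1
  apply List.ext_getElem?
  intro k
  have hb : ∀ i ∈ PySem.List.pyRange 0 (a.toList.length : Int) step,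
      0 ≤ i ∧ i < ((a.toList.length : Int)) := by
    intro i hi
    have h := (PySem.List.mem_pyRange_iff_of_pos hs i).mp hi
    exact ⟨h.1, h.2.1⟩
  rw [upinGoA_eq, List.nil_append, upinFA_getElem?,
      foldl_set_getElem? _ _ hb (nodup_pyRange_pos _ _ _ hs) k]
  rw [zero_add]
  by_cases hk : k < a.toList.length
  · have hmem : ((k : Int) ∈ PySem.List.pyRange 0 (a.toList.length : Int) step) ↔
        PySem.Int.mod (k : Int) step = 0 := by
      rw [PySem.List.mem_pyRange_iff_of_pos hs, PySem.Int.mod_eq_emod_of_pos hs]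
      constructor
      · rintro ⟨-, -, hd⟩
        have hdd : step ∣ (k : Int) := by simpa using hd
        simpa using Int.emod_eq_zero_of_dvd hdd
      · intro h
        refine ⟨Int.natCast_nonneg k, by exact_mod_cast hk, ?_⟩
        simpa using Int.dvd_of_emod_eq_zero (by simpa using h)
    by_cases hc : PySem.Int.mod (k : Int) step = 0
    · rw [if_pos (show (PySem.Int.mod (k : Int) step == 0) = true by simp [hc]),
          if_pos (hmem.mpr hc)]
    · have hnm : ¬ ((k : Int) ∈ PySem.List.pyRange 0 (a.toList.length : Int) step) :=
        fun h => hc (hmem.mp h)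
      rw [if_neg (show ¬ (PySem.Int.mod (k : Int) step == 0) = true by simp [hc]),
          if_neg hnm]
  · have h1 : a.toList[k]? = none := List.getElem?_eq_none (by omega)
    simp [h1]
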